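/-
  CARRY LEMMAS OF THE SEGMENTS OF `DGifDecompressLine` (the LZW decoder; the assertions: Gif/Spec/Seg_DGifDecompressLine.lean).
  A segment of the body starts at a state `v` with `Body cut … v` (inside `Main`, `Head`, `Upd`, `UpdRC`, `Mid`, `Decoded`, `Traced`,
  `Trace`, `Pop`, `Entered`: EVERY assertion of the function is `Body` plus clauses about registers, spill slots and the measure) and
  must give the assertion of its exit at a later state `s`. What is the same work in every one of them is proved ONCE here.

  §1  A STACK SLOT THROUGH A FOOTPRINT                                                                   namespace Gif.Spec
      slot_sameExcept              `m.readLE (sp − off) k = x` at `m'`, when no window written meets `[sp − off, sp − off + k)`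
  §2  WHERE THE OBJECTS ARE, AS NUMBERS (the prelude of a segment's proof)                               namespace Gif.Spec.DGifDecompressLine
      Body.len_lt                  `n < 2 ^ 31` (LineLen is a non-negative `int`)
      Body.gif_inside              `0x800040 ≤ gif`, `gif + 152 ≤ 0xC00000`, `gif % 16 = 0`
      Body.pv_inside               `0x800040 ≤ pv`, `pv + 24968 ≤ 0xC00000`, `pv % 16 = 0`
      Body.gif_pv_far              `gif + 184 ≤ pv ∨ pv + 25000 ≤ gif`
      Body.line                    for `1 ≤ n`: `Line[0 … n)` is a buffer UNDER THE BODY'S FRAMES (`BufOK`: its `.live` is what a check of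
                                   `Line[i]` asks), above the return address, below C00000H, off the private object
  §3  WHAT THE STORES OF A SEGMENT KEEP
      Scratch F n e w              the window `w` is one a segment may store to without losing anything: the stack below the body's
                                   stack pointer, the slots of LastCode / the two spills / CrntCode, `Buf[1 …]`, `Stack`, `Suffix`,
                                   `Prefix`, `gif.Error`, a non-empty window of `Line[0 … n)`
      ScratchLz F n e w            `Scratch`, or a window of the LZW scalars `[pv + 20, pv + 44)` (RunningCode … StackPtr)
      Body.carry                   `Body cut … v` and a footprint of `Scratch` windows from `v` to `s` give `Body cut' … s`,
                                   `Locals F e v → Locals F e s`, the same `mu`, the same `ClearCode`, the same `EOFCode`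
      Body.carry_lz                the same for `ScratchLz` windows; `LZOK s.mem F.pv` is then the segment's to prove
      dl_scratch                   (tactic) closes `∀ w, w ∈ [w₁, …, wₖ] → Scratch F n e w` (or `ScratchLz …`) for a literal footprint
  §4  THE SAME MEMORY AT ANOTHER ADDRESS (an exit that stored nothing: only scratch registers and flags differ)
      Body.moved, Locals.moved     `s.mem = v.mem`: `Body cut' … s`, `Locals F e s`
      Trace.moved                  `Trace cut' m k … s` (the same `r13`, `r15`, `rbx` too)

  WHICH CUTS THEY SERVE. `Body.carry`: every exit of Segments 1, 2, 4, 5, 7 … 15 and the exits of Segment 3 that follow a FAILED test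
  (no call in between): all their stores are `Scratch` windows. `Body.carry_lz`: Segment 6 (RunningCode, RunningBits, MaxCode1,
  LastCode) and the exit l.999-1002 of Segment 3 (`Private->LastCode`, `Private->StackPtr`). NOT the exit of Segment 3 behind
  `DGifDecompressInput` (the callee moves the cursor and `Buf[0]`: `Body` is rebuilt there from the callee's `Back` and
  `slot_sameExcept`), not the prologue (Segment P builds the first `Body`), not the epilogue.

  HOW AN EXIT OF A SEGMENT OF DGifDecompressLine IS PROVED WITH THIS (the worked units DGifDecompressLine.10, .11):
    1. prelude: `obtain` the clauses of the entry assertion (`hbody : Body cut … v`, `hloc : Locals F e v`, …); `v_entry hbody.entry`;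
       `have hgin := hbody.gif_inside`, `have hpin := hbody.pv_inside`, `have hn31 := hbody.len_lt` (`v_side`, `u_same`, `u_omega`
       place the stores with them); `w_rip`, `c_rsp`, `w_eq`, `hdf`, `hmx`, `hsse`, `w_kept` from `hbody`; the slots the code loads as
       `k_<name>` facts (`hbody.s_gif`, `hloc.s_stack`, …).
    2. `u_walk … until [the exits]`; every check goal is `(xLive …).accSmall hbody.inv.shadow hun …`.
    3. at an exit state `s_<addr>` (the walker gives `w_rip`, `w_rsp`, `w_eq`, `w_mem`, `w_<reg>`):
         have hun   : ShadowUntouched v.mem s.mem                         := by v_untouched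
         have hsame : Mem.SameExcept [the windows stored to] v.mem s.mem  := by rw [w_mem]; u_same
         have habi  : (conv u₀).inv s                                     := by v_inv
         obtain ⟨k_body, k_loc, k_mu, k_clear, k_eof⟩ :=
           hbody.carry (cut' := the exit's label) w_rip w_rsp w_eq habi hun hsame (by dl_scratch)
       then `ReachVia.done ⟨k_body, k_loc hloc, …⟩`: `k_mu` rewrites the measure clause back to `v` (`rw [k_mu]; exact h_mu`), `k_clear`
       the clause `r15d = ClearCode`; a register clause is `rw [w_<reg>, <a lemma of Gif/Spec/Words.lean>]; omega`; a spill slot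
       just written is `u_read`, one written earlier `u_frame <the fact at v>`.
    4. an exit that stored nothing (`w_mem : s.mem = v.mem`): `Body.moved` / `Locals.moved` / `Trace.moved`.
-/
import Gif.Spec.Seg_DGifDecompressLine
import Gif.Spec.Carry
import Gif.Spec.Words
namespace Gif.Spec
open X86 X86.User Asan ProgX.Base ProgX.Base.Spec

/-! ### 1. A stack slot through a footprint -/

/-- **A stack slot read through a footprint that misses it**: the slot is `[sp − off, sp − off + k)`, spelled as the assertions
spell it (`e.reg .rsp - 168`: the word `sp - UInt64.ofNat off`). For every clause `v.mem.readLE (e.reg .rsp - off) k = x` of an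
assertion that has to be stated again at a later memory. -/
theorem slot_sameExcept {ws : List Span} {m m' : Mem} (hs : Mem.SameExcept ws m m') (sp : Word) (off k x : Nat)
    (hoff : off ≤ sp.toNat) (hk : k ≤ off) (h : m.readLE (sp - UInt64.ofNat off) k = x)
    (hd : ∀ w, w ∈ ws → sp.toNat - off + k ≤ w.lo ∨ w.hi ≤ sp.toNat - off) : m'.readLE (sp - UInt64.ofNat off) k = x := by
  have hlt := sp.toNat_lt
  have e : (sp - UInt64.ofNat off).toNat = sp.toNat - off := word_sub_toNat_le sp off hoff
  rw [hs.readLE (sp - UInt64.ofNat off) k (by omega) ?_]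
  · exact h
  · intro w hw
    rw [e]
    exact hd w hw

namespace DGifDecompressLine

/-! ### 2. Where the objects are, as numbers -/

/-- **LineLen is a non-negative `int`.** -/
theorem Body.len_lt {cut : Word} {H : Heap} {rest : List Obj} {frames : List (Nat × FrameLayout)} {F : Forest} {R : Rd} {n : Nat}
    {u₀ e : State} {ret : Word} {v : State} (hb : Body cut H rest frames F R n u₀ e ret v) : n < 2 ^ 31 :=
  hb.pre.2.2.2.2.1

/-- **Where gif is**: in the heap's region, 16-aligned, its redzone below C00000H. What `v_side`, `u_same`, `u_omega` need to place a
store to `gif.Error` against the stack, and a load of gif's field against the text. -/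
theorem Body.gif_inside {cut : Word} {H : Heap} {rest : List Obj} {frames : List (Nat × FrameLayout)} {F : Forest} {R : Rd}
    {n : Nat} {u₀ e : State} {ret : Word} {v : State} (hb : Body cut H rest frames F R n u₀ e ret v) :
    0x800040 ≤ F.gif ∧ F.gif + 152 ≤ 0xC00000 ∧ F.gif % 16 = 0 := by
  have henv : Env H rest frames F R e := hb.pre.1
  have hbase := henv.heap.base
  have hin := hb.ok.owns.inside hb.inv.heap (o := (F.gif, 120)) List.mem_cons_self
  simp only at hin
  omega

/-- **Where the private object is**: in the heap's region, 16-aligned, its redzone below C00000H. What `v_side`, `u_same`, `u_omega` need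
to place the accesses of `Buf`, `Stack`, `Suffix`, `Prefix` and the LZW scalars. -/
theorem Body.pv_inside {cut : Word} {H : Heap} {rest : List Obj} {frames : List (Nat × FrameLayout)} {F : Forest} {R : Rd}
    {n : Nat} {u₀ e : State} {ret : Word} {v : State} (hb : Body cut H rest frames F R n u₀ e ret v) :
    0x800040 ≤ F.pv ∧ F.pv + 24968 ≤ 0xC00000 ∧ F.pv % 16 = 0 := by
  have henv : Env H rest frames F R e := hb.pre.1
  have hbase := henv.heap.base
  have hin := hb.ok.owns.inside hb.inv.heap (o := (F.pv, 24936)) (List.mem_cons_of_mem _ List.mem_cons_self)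
  simp only at hin
  omega

/-- **gif and the private object are two objects, 64 bytes apart**: a store to `gif.Error` leaves every field of pv, and back. -/
theorem Body.gif_pv_far {cut : Word} {H : Heap} {rest : List Obj} {frames : List (Nat × FrameLayout)} {F : Forest} {R : Rd}
    {n : Nat} {u₀ e : State} {ret : Word} {v : State} (hb : Body cut H rest frames F R n u₀ e ret v) :
    F.gif + 184 ≤ F.pv ∨ F.pv + 25000 ≤ F.gif := by
  have hne := hb.ok.gif_ne_pv
  have hfar := hb.ok.owns.far hb.inv.heap (a := (F.gif, 120)) (b := (F.pv, 24936)) List.mem_cons_self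
    (List.mem_cons_of_mem _ List.mem_cons_self) (by
      intro h
      exact hne (congrArg Prod.fst h))
  simp only at hfar
  omega

/-- **The buffer `Line[0 … n)`, `1 ≤ n`** (so: at every store `Line[i] =`, behind the test `i < LineLen`): a buffer under the frames
OF THE BODY (the own protected frame pushed: `.live` is the `LiveIn` that the check of `Line[i]` asks, `.loose` / `.win` what `GifOK` and
the heap's invariant ask of the store); it lies above the function's return address (a store to it meets no slot of the function),
below C00000H, and does not meet the private object. -/
theorem Body.line {cut : Word} {H : Heap} {rest : List Obj} {frames : List (Nat × FrameLayout)} {F : Forest} {R : Rd} {n : Nat}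
    {u₀ e : State} {ret : Word} {v : State} (hb : Body cut H rest frames F R n u₀ e ret v) (hn : 1 ≤ n) :
    BufOK H rest (framesIn frames e) F R (e.reg .rsi).toNat n ∧
    (e.reg .rsp).toNat + 8 ≤ (e.reg .rsi).toNat ∧
    (e.reg .rsi).toNat + n ≤ 0xC00000 ∧
    ((e.reg .rsi).toNat + n ≤ F.pv ∨ F.pv + 24936 ≤ (e.reg .rsi).toNat) := by
  have henv : Env H rest frames F R e := hb.pre.1
  have hp := henv.heap
  have htop := hp.inv.shadow.stack.hi
  rcases hb.pre.2.2.2.2.2 with h0 | ⟨hbuf, hap⟩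
  · omega
  · have hwhere := hbuf.live.where_ hp.inv.shadow hp.shadowPre.offText (by omega)
    refine ⟨hbuf.push _, hbuf.above hn hp htop, ?_, hap⟩
    omega

/-! ### 3. What the stores of a segment keep -/

/-- **A WINDOW A SEGMENT OF THE BODY MAY STORE TO** and keep `Body`, `Locals`, `LZOK` and the measure of the main loop (`RA` = the
entry's `rsp`; the body's stack pointer is `RA − 200`):
  * the stack below the body's stack pointer, `[RA − 560, RA − 200)` (the return addresses of the check routines, the callees' frames);
  * the slot of `LastCode` `[rsp+14H]`; the two spill slots `[rsp+38H]`, `[rsp+40H]`; the frame's object `CrntCode` `[rsp+70H]`;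
  * `Buf[1 …]`, `Stack`, `Suffix`, `Prefix` of the private object (each inside ITS OWN window of the contract's footprint);
  * `gif.Error`;
  * a NON-EMPTY window of `Line[0 … n)`.
NOT the LZW scalars `[pv + 8, pv + 56)` and `Buf[0]`: see `ScratchLz`. -/
def Scratch (F : Forest) (n : Nat) (e : State) (w : Span) : Prop :=
  ((e.reg .rsp).toNat - 560 ≤ w.lo ∧ w.hi ≤ (e.reg .rsp).toNat - 200) ∨
  ((e.reg .rsp).toNat - 180 ≤ w.lo ∧ w.hi ≤ (e.reg .rsp).toNat - 176) ∨
  ((e.reg .rsp).toNat - 144 ≤ w.lo ∧ w.hi ≤ (e.reg .rsp).toNat - 128) ∨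
  ((e.reg .rsp).toNat - 88 ≤ w.lo ∧ w.hi ≤ (e.reg .rsp).toNat - 84) ∨
  (F.pv + 89 ≤ w.lo ∧ w.hi ≤ F.pv + 344) ∨
  (F.pv + 344 ≤ w.lo ∧ w.hi ≤ F.pv + 4439) ∨
  (F.pv + 4439 ≤ w.lo ∧ w.hi ≤ F.pv + 8535) ∨
  (F.pv + 8536 ≤ w.lo ∧ w.hi ≤ F.pv + 24920) ∨
  (F.gif + 96 ≤ w.lo ∧ w.hi ≤ F.gif + 100) ∨
  ((e.reg .rsi).toNat ≤ w.lo ∧ w.lo < w.hi ∧ w.hi ≤ (e.reg .rsi).toNat + n)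

/-- **A SCRATCH WINDOW, OR A WINDOW OF THE LZW SCALARS A SEGMENT REWRITES** `[pv + 20, pv + 44)` (RunningCode, RunningBits, MaxCode1,
LastCode, CrntCode, StackPtr: Segment 6 and l.999-1000 of Segment 3). Such a store keeps everything of `Body` but `LZOK`, which the
segment proves of its exit state; `ClearCode`, `EOFCode`, `CrntShiftState`, `Buf[0]` (the measure) are not in it. -/
def ScratchLz (F : Forest) (n : Nat) (e : State) (w : Span) : Prop :=
  Scratch F n e w ∨ (F.pv + 20 ≤ w.lo ∧ w.hi ≤ F.pv + 44)

/-- **`Body` AND `Locals` THROUGH A SEGMENT'S STORES, the LZW scalars among them.** As `Body.carry`, for a footprint of `ScratchLz`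
windows; the field ranges `LZOK` of the exit state are a hypothesis (Segment 6: from the values stored; l.1000: `StackPtr ≤ 4095`). -/
theorem Body.carry_lz {cut cut' : Word} {H : Heap} {rest : List Obj} {frames : List (Nat × FrameLayout)} {F : Forest} {R : Rd}
    {n : Nat} {u₀ e : State} {ret : Word} {v s : State}
    (hb : Body cut H rest frames F R n u₀ e ret v)
    (hrip : s.rip = cut') (hrsp : s.reg .rsp = e.reg .rsp - 200)
    (hcode : Mem.EqOn ProgX.Base.L.textLo ProgX.Base.L.textHi u₀.mem s.mem) (habi : (conv u₀).inv s)
    {ws : List Span} (hun : ShadowUntouched v.mem s.mem) (hs : Mem.SameExcept ws v.mem s.mem)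
    (hws : ∀ w, w ∈ ws → ScratchLz F n e w) (hlz : LZOK s.mem F.pv) :
    Body cut' H rest frames F R n u₀ e ret s ∧
    (Locals F e v → Locals F e s) ∧
    mu R s.mem F.pv = mu R v.mem F.pv ∧
    GifFilePrivateType.ClearCode s.mem F.pv = GifFilePrivateType.ClearCode v.mem F.pv ∧
    GifFilePrivateType.EOFCode s.mem F.pv = GifFilePrivateType.EOFCode v.mem F.pv := by
  have henv : Env H rest frames F R e := hb.pre.1
  have hroom : 0x700000 + 560 ≤ (e.reg .rsp).toNat := hb.entry.room
  have htop : (e.reg .rsp).toNat + 8 ≤ 0x800000 := hb.entry.top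
  have hok := hb.inv.heap
  have hcur := henv.ctx.cursor_range henv.heap.inv.shadow
  have hplaced := hb.ok.owns.placed hok
  have hgin := hb.gif_inside
  have hpin := hb.pv_inside
  have hfar := hb.gif_pv_far
  -- where `Line` is, if a window of it was written
  have hlineAbove : ∀ w : Span, (e.reg .rsi).toNat ≤ w.lo → w.lo < w.hi → w.hi ≤ (e.reg .rsi).toNat + n →
      (e.reg .rsp).toNat + 8 ≤ (e.reg .rsi).toNat ∧
      ((e.reg .rsi).toNat + n ≤ F.pv ∨ F.pv + 24936 ≤ (e.reg .rsi).toNat) ∧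
      Loose H F R w ∧ HeapWin H w := by
    intro w a b c
    obtain ⟨hbuf, habove, _, hap⟩ := hb.line (by omega)
    refine ⟨habove, hap, ?_, ?_⟩
    · exact hbuf.loose.sub (by simp only; omega) (by simp only; omega)
    · exact hbuf.win.sub (by simp only; omega) (by simp only; omega)
  -- every window is loose
  have hloose : ∀ w, w ∈ ws → Loose H F R w := by
    intro w hw
    rcases hws w hw with (⟨a, b⟩ | ⟨a, b⟩ | ⟨a, b⟩ | ⟨a, b⟩ | ⟨a, b⟩ | ⟨a, b⟩ | ⟨a, b⟩ | ⟨a, b⟩ | ⟨a, b⟩ | ⟨a, b, c⟩) | ⟨a, b⟩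
    · exact Loose.stack hok (by omega) (by omega) (by omega)
    · exact Loose.stack hok (by omega) (by omega) (by omega)
    · exact Loose.stack hok (by omega) (by omega) (by omega)
    · exact Loose.stack hok (by omega) (by omega) (by omega)
    · exact Loose.pvBody (Or.inr ⟨by omega, by omega⟩)
    · exact Loose.pvBody (Or.inr ⟨by omega, by omega⟩)
    · exact Loose.pvBody (Or.inr ⟨by omega, by omega⟩)
    · exact Loose.pvBody (Or.inr ⟨by omega, by omega⟩)
    · exact Loose.gifScalar (Or.inr (Or.inr ⟨by omega, by omega⟩))
    · exact (hlineAbove w a b c).2.2.1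
    · exact Loose.pvBody (Or.inl ⟨by omega, by omega⟩)
  -- every window is a heap window
  have hwin : ∀ w, w ∈ ws → HeapWin H w := by
    intro w hw
    have offHeap : w.hi ≤ (e.reg .rsp).toNat → HeapWin H w := by
      intro h
      apply HeapWin.offHeap hok
      left
      have hbase := henv.heap.base
      omega
    rcases hws w hw with (⟨a, b⟩ | ⟨a, b⟩ | ⟨a, b⟩ | ⟨a, b⟩ | ⟨a, b⟩ | ⟨a, b⟩ | ⟨a, b⟩ | ⟨a, b⟩ | ⟨a, b⟩ | ⟨a, b, c⟩) | ⟨a, b⟩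
    · exact offHeap (by omega)
    · exact offHeap (by omega)
    · exact offHeap (by omega)
    · exact offHeap (by omega)
    · exact HeapWin.pv hok hb.ok.owns (by omega) (by omega)
    · exact HeapWin.pv hok hb.ok.owns (by omega) (by omega)
    · exact HeapWin.pv hok hb.ok.owns (by omega) (by omega)
    · exact HeapWin.pv hok hb.ok.owns (by omega) (by omega)
    · exact HeapWin.gif hok hb.ok.owns (by omega) (by omega)
    · exact (hlineAbove w a b c).2.2.2
    · exact HeapWin.pv hok hb.ok.owns (by omega) (by omega)
  -- every window misses `BitsPerPixel`, `ClearCode`, `EOFCode` `[pv + 8, pv + 20)` and `CrntShiftState` … `Buf[0]` `[pv + 44, pv + 89)`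
  have hmiss : ∀ w, w ∈ ws → w.hi ≤ F.pv + 8 ∨ F.pv + 89 ≤ w.lo ∨ (F.pv + 20 ≤ w.lo ∧ w.hi ≤ F.pv + 44) := by
    intro w hw
    rcases hws w hw with (⟨a, b⟩ | ⟨a, b⟩ | ⟨a, b⟩ | ⟨a, b⟩ | ⟨a, b⟩ | ⟨a, b⟩ | ⟨a, b⟩ | ⟨a, b⟩ | ⟨a, b⟩ | ⟨a, b, c⟩) | ⟨a, b⟩
    · omega
    · omega
    · omega
    · omega
    · omega
    · omega
    · omega
    · omega
    · omega
    · have := hlineAbove w a b c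
      omega
    · omega
  -- every window misses the cursor
  have hoffcur : ∀ w, w ∈ ws → w.hi ≤ R.cur ∨ R.cur + 16 ≤ w.lo := by
    intro w hw
    exact (hloose w hw).off_cursor hok hplaced ⟨hcur.1, hcur.2.1⟩
  -- every window misses the constant slots of the function's stack and the return-address slot
  have hslots : ∀ a k : Nat,
      (((e.reg .rsp).toNat - 200 ≤ a ∧ a + k ≤ (e.reg .rsp).toNat - 180) ∨
       ((e.reg .rsp).toNat - 176 ≤ a ∧ a + k ≤ (e.reg .rsp).toNat - 144) ∨
       ((e.reg .rsp).toNat - 128 ≤ a ∧ a + k ≤ (e.reg .rsp).toNat - 88) ∨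
       ((e.reg .rsp).toNat - 84 ≤ a ∧ a + k ≤ (e.reg .rsp).toNat + 8)) →
      ∀ w, w ∈ ws → a + k ≤ w.lo ∨ w.hi ≤ a := by
    intro a k hak w hw
    rcases hws w hw with (⟨p, q⟩ | ⟨p, q⟩ | ⟨p, q⟩ | ⟨p, q⟩ | ⟨p, q⟩ | ⟨p, q⟩ | ⟨p, q⟩ | ⟨p, q⟩ | ⟨p, q⟩ | ⟨p, q, r⟩) | ⟨p, q⟩
    · omega
    · omega
    · omega
    · omega
    · omega
    · omega
    · omega
    · omega
    · omega
    · have := hlineAbove w p q r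
      omega
    · omega
  -- the footprint since the entry: every window lies inside one of the contract's
  have hsameE : Mem.SameExcept
      [⟨(e.reg .rsp).toNat - 560, (e.reg .rsp).toNat⟩,
       shadowSpan ((e.reg .rsp).toNat - 120) ((e.reg .rsp).toNat - 56),
       ⟨(e.reg .rsi).toNat, (e.reg .rsi).toNat + n⟩,
       ⟨F.pv + 20, F.pv + 56⟩,
       ⟨F.pv + 88, F.pv + 344⟩,
       ⟨F.pv + 344, F.pv + 4439⟩,
       ⟨F.pv + 4439, F.pv + 8535⟩,
       ⟨F.pv + 8536, F.pv + 24920⟩,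
       ⟨F.gif + 96, F.gif + 100⟩,
       ⟨R.cur, R.cur + 8⟩] e.mem s.mem := by
    apply Mem.SameExcept.step_same' hb.same hs
    intro w hw
    by_cases hempty : w.hi ≤ w.lo
    · left
      exact hempty
    right
    rcases hws w hw with (⟨a, b⟩ | ⟨a, b⟩ | ⟨a, b⟩ | ⟨a, b⟩ | ⟨a, b⟩ | ⟨a, b⟩ | ⟨a, b⟩ | ⟨a, b⟩ | ⟨a, b⟩ | ⟨a, b, c⟩) | ⟨a, b⟩
    · exact ⟨⟨(e.reg .rsp).toNat - 560, (e.reg .rsp).toNat⟩, by simp only [List.mem_cons, true_or], by simp only; omega,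
        by simp only; omega⟩
    · exact ⟨⟨(e.reg .rsp).toNat - 560, (e.reg .rsp).toNat⟩, by simp only [List.mem_cons, true_or], by simp only; omega,
        by simp only; omega⟩
    · exact ⟨⟨(e.reg .rsp).toNat - 560, (e.reg .rsp).toNat⟩, by simp only [List.mem_cons, true_or], by simp only; omega,
        by simp only; omega⟩
    · exact ⟨⟨(e.reg .rsp).toNat - 560, (e.reg .rsp).toNat⟩, by simp only [List.mem_cons, true_or], by simp only; omega,
        by simp only; omega⟩
    · exact ⟨⟨F.pv + 88, F.pv + 344⟩, by simp only [List.mem_cons, true_or, or_true], by simp only; omega, by simp only; omega⟩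
    · exact ⟨⟨F.pv + 344, F.pv + 4439⟩, by simp only [List.mem_cons, true_or, or_true], by simp only; omega, by simp only; omega⟩
    · exact ⟨⟨F.pv + 4439, F.pv + 8535⟩, by simp only [List.mem_cons, true_or, or_true], by simp only; omega, by simp only; omega⟩
    · exact ⟨⟨F.pv + 8536, F.pv + 24920⟩, by simp only [List.mem_cons, true_or, or_true], by simp only; omega,
        by simp only; omega⟩
    · exact ⟨⟨F.gif + 96, F.gif + 100⟩, by simp only [List.mem_cons, true_or, or_true], by simp only; omega, by simp only; omega⟩
    · exact ⟨⟨(e.reg .rsi).toNat, (e.reg .rsi).toNat + n⟩, by simp only [List.mem_cons, true_or, or_true], by simp only; omega,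
        by simp only; omega⟩
    · exact ⟨⟨F.pv + 20, F.pv + 56⟩, by simp only [List.mem_cons, true_or, or_true], by simp only; omega, by simp only; omega⟩
  -- the two fields of pv that `Locals` mentions
  have e_clear : GifFilePrivateType.ClearCode s.mem F.pv = GifFilePrivateType.ClearCode v.mem F.pv := by
    simp only [gfield]
    apply hs.rd (F.pv + 12) 4 (by omega)
    intro w hw
    have := hmiss w hw
    omega
  have e_eof : GifFilePrivateType.EOFCode s.mem F.pv = GifFilePrivateType.EOFCode v.mem F.pv := by
    simp only [gfield]
    apply hs.rd (F.pv + 16) 4 (by omega)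
    intro w hw
    have := hmiss w hw
    omega
  have e_rem : Gif.Spec.rem R s.mem = Gif.Spec.rem R v.mem := rem_sameExcept hs (by omega) hoffcur
  refine ⟨⟨hb.entry, hb.pre, hb.apart, hrip, hrsp, ?_, ?_, ?_, ?_, ?_, ?_, ?_, ?_, ?_, ?_, ?_, ?_, hlz, ?_, hsameE,
    ProgX.Base.conv_code_in hcode, habi⟩, ?_, ?_, e_clear, e_eof⟩
  · exact slot_sameExcept hs (e.reg .rsp) 8 8 _ (by omega) (by omega) hb.slot_r15 (hslots _ _ (by omega))
  · exact slot_sameExcept hs (e.reg .rsp) 16 8 _ (by omega) (by omega) hb.slot_r14 (hslots _ _ (by omega))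
  · exact slot_sameExcept hs (e.reg .rsp) 24 8 _ (by omega) (by omega) hb.slot_r13 (hslots _ _ (by omega))
  · exact slot_sameExcept hs (e.reg .rsp) 32 8 _ (by omega) (by omega) hb.slot_r12 (hslots _ _ (by omega))
  · exact slot_sameExcept hs (e.reg .rsp) 40 8 _ (by omega) (by omega) hb.slot_rbp (hslots _ _ (by omega))
  · exact slot_sameExcept hs (e.reg .rsp) 48 8 _ (by omega) (by omega) hb.slot_rbx (hslots _ _ (by omega))
  · rw [hs.readLE (e.reg .rsp) 8 (by omega) (hslots _ _ (by omega))]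
    exact hb.slot_ra
  · exact slot_sameExcept hs (e.reg .rsp) 168 8 _ (by omega) (by omega) hb.s_gif (hslots _ _ (by omega))
  · exact slot_sameExcept hs (e.reg .rsp) 160 4 _ (by omega) (by omega) hb.s_len (hslots _ _ (by omega))
  · exact slot_sameExcept hs (e.reg .rsp) 152 8 _ (by omega) (by omega) hb.s_line (hslots _ _ (by omega))
  · exact hb.inv.sameExcept hun hs hwin
  · exact hb.ok.sameExcept hok ⟨hcur.1, hcur.2.1⟩ hs hloose
  · rw [e_rem]
    exact hb.rem
  · intro hl
    refine ⟨?_, ?_, ?_, ?_, ?_⟩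
    · exact slot_sameExcept hs (e.reg .rsp) 192 8 _ (by omega) (by omega) hl.s_stack (hslots _ _ (by omega))
    · rw [e_clear]
      exact slot_sameExcept hs (e.reg .rsp) 184 4 _ (by omega) (by omega) hl.s_clear (hslots _ _ (by omega))
    · exact slot_sameExcept hs (e.reg .rsp) 176 8 _ (by omega) (by omega) hl.s_suffix (hslots _ _ (by omega))
    · rw [e_eof]
      exact slot_sameExcept hs (e.reg .rsp) 156 4 _ (by omega) (by omega) hl.s_eof (hslots _ _ (by omega))
    · exact slot_sameExcept hs (e.reg .rsp) 128 8 _ (by omega) (by omega) hl.s_shadow (hslots _ _ (by omega))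
  · apply mu_sameExcept hs (by omega) (by omega) hoffcur
    · intro w hw
      have := hmiss w hw
      omega
    · intro w hw
      have := hmiss w hw
      omega

/-- **`Body` AND `Locals` THROUGH A SEGMENT'S STORES.** `v` is a state with `Body` (and `Locals`, from Segment 1 on), `s` a later state
of the same segment: the stack pointer is the body's, the text is unchanged, the ABI's invariant holds, no shadow byte was written,
and every window written is a scratch window (`Scratch`; the goal `hws` is closed by `dl_scratch`). Then `Body` (at the address `s`
is at) and `Locals` hold of `s`, the measure of the main loop is what it was, and so are `ClearCode` (what `r15d` holds in the trace
loop) and `EOFCode`. The spill slots themselves (`[rsp+38H]`, `[rsp+40H]`, `LastCode`, the frame's `CrntCode`) are the segment's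
business: `u_frame` / `u_read`. -/
theorem Body.carry {cut cut' : Word} {H : Heap} {rest : List Obj} {frames : List (Nat × FrameLayout)} {F : Forest} {R : Rd}
    {n : Nat} {u₀ e : State} {ret : Word} {v s : State}
    (hb : Body cut H rest frames F R n u₀ e ret v)
    (hrip : s.rip = cut') (hrsp : s.reg .rsp = e.reg .rsp - 200)
    (hcode : Mem.EqOn ProgX.Base.L.textLo ProgX.Base.L.textHi u₀.mem s.mem) (habi : (conv u₀).inv s)
    {ws : List Span} (hun : ShadowUntouched v.mem s.mem) (hs : Mem.SameExcept ws v.mem s.mem)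
    (hws : ∀ w, w ∈ ws → Scratch F n e w) :
    Body cut' H rest frames F R n u₀ e ret s ∧
    (Locals F e v → Locals F e s) ∧
    mu R s.mem F.pv = mu R v.mem F.pv ∧
    GifFilePrivateType.ClearCode s.mem F.pv = GifFilePrivateType.ClearCode v.mem F.pv ∧
    GifFilePrivateType.EOFCode s.mem F.pv = GifFilePrivateType.EOFCode v.mem F.pv := by
  have hroom : 0x700000 + 560 ≤ (e.reg .rsp).toNat := hb.entry.room
  have htop : (e.reg .rsp).toNat + 8 ≤ 0x800000 := hb.entry.top
  have hpin := hb.pv_inside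
  have hfar := hb.gif_pv_far
  -- no window meets the LZW scalars: `LZOK` is carried
  have hlz : LZOK s.mem F.pv := by
    apply hb.lz.sameExcept hs (by omega)
    intro w hw
    rcases hws w hw with ⟨a, b⟩ | ⟨a, b⟩ | ⟨a, b⟩ | ⟨a, b⟩ | ⟨a, b⟩ | ⟨a, b⟩ | ⟨a, b⟩ | ⟨a, b⟩ | ⟨a, b⟩ | ⟨a, b, c⟩
    · omega
    · omega
    · omega
    · omega
    · omega
    · omega
    · omega
    · omega
    · omega
    · have hline := (hb.line (by omega)).2.2.2
      omega
  apply hb.carry_lz hrip hrsp hcode habi hun hs ?_ hlz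
  intro w hw
  exact Or.inl (hws w hw)

/-- **Every window of a literal footprint is a scratch window**: closes the goal `∀ w, w ∈ [w₁, …, wₖ] → Scratch F n e w` (the
hypothesis `hws` of `Body.carry`; also `… → ScratchLz F n e w` of `Body.carry_lz`) by `omega`, all windows at once. The context must
hold what places a window of `Line` (`i < n`, the register's number); the stack windows and the windows of pv and gif need nothing. -/
macro "dl_scratch" : tactic => `(tactic| (
  simp only [List.forall_mem_cons, List.not_mem_nil, false_imp_iff, implies_true, and_true,
    Gif.Spec.DGifDecompressLine.Scratch, Gif.Spec.DGifDecompressLine.ScratchLz]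
  omega))

/-! ### 4. The same memory at another address -/

/-- **`Body` at a state with the same memory** (an exit of a loop test: registers and flags were written, nothing stored). -/
theorem Body.moved {cut cut' : Word} {H : Heap} {rest : List Obj} {frames : List (Nat × FrameLayout)} {F : Forest} {R : Rd}
    {n : Nat} {u₀ e : State} {ret : Word} {v s : State} (hb : Body cut H rest frames F R n u₀ e ret v)
    (hrip : s.rip = cut') (hrsp : s.reg .rsp = e.reg .rsp - 200) (hmem : s.mem = v.mem) (habi : (conv u₀).inv s) :
    Body cut' H rest frames F R n u₀ e ret s := by
  refine ⟨hb.entry, hb.pre, hb.apart, hrip, hrsp, ?_, ?_, ?_, ?_, ?_, ?_, ?_, ?_, ?_, ?_, ?_, ?_, ?_, ?_, ?_, ?_, habi⟩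
  · rw [hmem]
    exact hb.slot_r15
  · rw [hmem]
    exact hb.slot_r14
  · rw [hmem]
    exact hb.slot_r13
  · rw [hmem]
    exact hb.slot_r12
  · rw [hmem]
    exact hb.slot_rbp
  · rw [hmem]
    exact hb.slot_rbx
  · rw [hmem]
    exact hb.slot_ra
  · rw [hmem]
    exact hb.s_gif
  · rw [hmem]
    exact hb.s_len
  · rw [hmem]
    exact hb.s_line
  · rw [hmem]
    exact hb.inv
  · rw [hmem]
    exact hb.ok
  · rw [hmem]
    exact hb.lz
  · rw [hmem]
    exact hb.rem
  · rw [hmem]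
    exact hb.same
  · rw [hmem]
    exact hb.code

/-- **`Locals` at a state with the same memory.** -/
theorem Locals.moved {F : Forest} {e v s : State} (hl : Locals F e v) (hmem : s.mem = v.mem) : Locals F e s := by
  refine ⟨?_, ?_, ?_, ?_, ?_⟩
  · rw [hmem]
    exact hl.s_stack
  · rw [hmem]
    exact hl.s_clear
  · rw [hmem]
    exact hl.s_suffix
  · rw [hmem]
    exact hl.s_eof
  · rw [hmem]
    exact hl.s_shadow

/-- **`Trace` at a state that differs in scratch registers and flags only**: the same memory, stack pointer, `r13`, `r15`, `rbx`
(the two exits of the loop test of the trace loop: `rax`, `rdx`, the flags were written). -/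
theorem Trace.moved {cut cut' : Word} {m k : Nat} {H : Heap} {rest : List Obj} {frames : List (Nat × FrameLayout)} {F : Forest}
    {R : Rd} {n : Nat} {u₀ e : State} {ret : Word} {v s : State}
    (ht : Trace cut m k H rest frames F R n u₀ e ret v)
    (hrip : s.rip = cut') (hrsp : s.reg .rsp = e.reg .rsp - 200) (hmem : s.mem = v.mem)
    (h13 : s.reg .r13 = v.reg .r13) (h15 : s.reg .r15 = v.reg .r15) (hbx : s.reg .rbx = v.reg .rbx)
    (habi : (conv u₀).inv s) : Trace cut' m k H rest frames F R n u₀ e ret s := by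
  obtain ⟨hb, hl, g13, g15, gbx, gi, gpv, gmu⟩ := ht
  refine ⟨hb.moved hrip hrsp hmem habi, hl.moved hmem, ?_, ?_, ?_, ?_, ?_, ?_⟩
  · rw [h13]
    exact g13
  · rw [h15, hmem]
    exact g15
  · rw [hbx]
    exact gbx
  · rw [hmem]
    exact gi
  · rw [hmem]
    exact gpv
  · rw [hmem]
    exact gmu

end DGifDecompressLine

end Gif.Spec
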